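-- pv_equiv track=rewrite | github.com/sanha-hwang/Baekjoon_my_sol | 6.함수/한수.py | solve
-- ===== SOURCE A (Python) =====
-- def solve(limit):
--     i = 1
--     count = 0
--     while i <= limit:
--         if i < 100:
--             count += 1
--         elif i < 1000:
--             str_i = str(i)
--             index = len(str_i)-1
--             if int(str_i[index-2]) - int(str_i[index-1]) == int(str_i[index-1]) - int(str_i[index]):
--                 count += 1
--         else:
--             pass
--         i += 1
--     return count
-- ===== SOURCE B (Python) =====
-- def solve(limit):
--     # closed form for 1..99, then a single scan over the three-digit range only
--     count = max(0, min(limit, 99))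
--     for i in range(100, min(limit, 999) + 1):
--         a, b, c = i // 100, (i // 10) % 10, i % 10
--         if a - b == b - c:
--             count += 1
--     return count
-- ===== Notes on version B (the rewrite author's own statement) =====
-- stated objective: faster
-- what changed: Replaces the flat 1..limit while-loop (which string-converts every three-digit number and idles past 999) with a closed-form term max(0, min(limit, 99)) for the small numbers plus a bounded arithmetic-digit scan over range(100, min(limit, 999)+1), so the work no longer grows with limit.
import Mathlib
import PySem

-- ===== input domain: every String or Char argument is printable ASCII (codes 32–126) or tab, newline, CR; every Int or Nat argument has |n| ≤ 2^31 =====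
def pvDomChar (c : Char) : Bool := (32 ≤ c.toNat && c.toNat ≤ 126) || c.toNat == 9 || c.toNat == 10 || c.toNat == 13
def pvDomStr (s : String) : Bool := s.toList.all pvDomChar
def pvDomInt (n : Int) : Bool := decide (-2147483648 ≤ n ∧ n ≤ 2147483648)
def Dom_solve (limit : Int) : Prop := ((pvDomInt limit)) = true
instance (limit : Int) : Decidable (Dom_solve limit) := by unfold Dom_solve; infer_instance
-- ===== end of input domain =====

-- B replaces A's flat 1..limit loop by a closed-form count for 1..99 plus a bounded scan
-- of the three-digit range with arithmetic digit extraction (no string conversion).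


-- ===== PORT A =====
-- one iteration of A's while-loop body (for the current i, update count)
def solveStep (count : Int) (i : Int) : Int :=
  if i < 100 then count + 1
  else if i < 1000 then
    (let str_i := PySem.Int.toStr i
     let index : Int := PySem.Str.len str_i - 1
     match PySem.Str.pyGet? str_i (index - 2), PySem.Str.pyGet? str_i (index - 1),
           PySem.Str.pyGet? str_i index with
     | some c0, some c1, some c2 =>
       match PySem.Int.ofChars? [c0], PySem.Int.ofChars? [c1], PySem.Int.ofChars? [c2] with
       | some d0, some d1, some d2 => if d0 - d1 = d1 - d2 then count + 1 else count
       | _, _, _ => count  -- unreachable: every character of str(i) parses as an int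
     | _, _, _ => count)   -- unreachable: str(i) has 3 characters for 100 ≤ i < 1000
  else count

-- A's 'i = 1; while i <= limit: …; i += 1' as a fold over the visited values of i
def solve (limit : Int) : Int :=
  (PySem.List.pyRange 1 (limit + 1) 1).foldl solveStep 0

-- ===== PORT B =====
def apThreeDigit (i : Int) : Bool :=
  let a := PySem.Int.floordiv i 100
  let b := PySem.Int.mod (PySem.Int.floordiv i 10) 10
  let c := PySem.Int.mod i 10
  a - b == b - c

def solve_alt (limit : Int) : Int :=
  (PySem.List.pyRange 100 (min limit 999 + 1) 1).foldl
    (fun cnt i => if apThreeDigit i then cnt + 1 else cnt)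
    (max 0 (min limit 99))

-- ===== PRECONDITION & SPEC =====
def Spec_solve (limit : Int) (out : Int) : Prop := out = solve_alt limit
instance (limit : Int) (out : Int) : Decidable (Spec_solve limit out) := by unfold Spec_solve; infer_instance

-- ===== CLAIM (what is proved, stated in full; the proofs are below) =====
def Claim_equal_solve : Prop := ∀ (limit : Int), Dom_solve limit → Spec_solve limit (solve limit)

-- ===== LEMMAS AND PROOFS =====

-- A's loop body adds an increment that does not depend on the accumulator
lemma solveStep_add (c i : Int) : solveStep c i = c + solveStep 0 i := by
  unfold solveStep
  dsimp only
  repeat' split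
  all_goals omega

-- str(n) for a three-digit n, via the fuel recursion of Nat.toDigits
lemma toDigits_three (m : Nat) (h : m ≤ 899) :
    Nat.toDigits 10 (m+100) = [Nat.digitChar ((m+100)/100), Nat.digitChar ((m+100)/10%10), Nat.digitChar ((m+100)%10)] := by
  have h1 : (m+100)/10 ≠ 0 := by omega
  have h2 : (m+100)/10/10 ≠ 0 := by omega
  have h3 : (m+100)/10/10/10 = 0 := by omega
  simp [Nat.toDigits, Nat.toDigitsCore, h1, h2, h3]
  congr 1
  omega

-- int() of a single digit character
lemma ofChars_digitChar (x : Nat) (h : x < 10) :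
    PySem.Int.ofChars? [x.digitChar] = some (x : Int) := by
  interval_cases x
  all_goals decide

lemma toStr_three (m : Nat) (h : m ≤ 899) :
    (PySem.Int.toStr ((m:Int)+100)).toList
      = [Nat.digitChar ((m+100)/100), Nat.digitChar ((m+100)/10%10), Nat.digitChar ((m+100)%10)] := by
  rw [PySem.Int.toList_toStr]
  have : PySem.Int.toChars ((m:Int)+100) = Nat.toDigits 10 (m+100) := by
    have ht : ((m:Int)+100).toNat = m+100 := by omega
    simp only [PySem.Int.toChars, if_neg (by omega : ¬ ((m:Int)+100 < 0)), ht]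
  rw [this, toDigits_three m h]

-- on a three-digit number A's string test agrees with B's arithmetic test
lemma step_eval (m : Nat) (h : m ≤ 899) :
    solveStep 0 ((m:Int)+100) = (if apThreeDigit ((m:Int)+100) then 1 else 0) := by
  unfold solveStep
  rw [if_neg (by omega), if_pos (by omega)]
  have hL := toStr_three m h
  have hlen : PySem.Str.len (PySem.Int.toStr ((m:Int)+100)) = 3 := by
    simp [PySem.Str.len, hL]
  simp only [hlen]
  have g0 : PySem.Str.pyGet? (PySem.Int.toStr ((m:Int)+100)) (3-1-2) = some (Nat.digitChar ((m+100)/100)) := by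
    simp [PySem.Str.pyGet?, hL, PySem.List.pyGet?, PySem.List.pyIdx?]
  have g1 : PySem.Str.pyGet? (PySem.Int.toStr ((m:Int)+100)) (3-1-1) = some (Nat.digitChar ((m+100)/10%10)) := by
    simp [PySem.Str.pyGet?, hL, PySem.List.pyGet?, PySem.List.pyIdx?]
  have g2 : PySem.Str.pyGet? (PySem.Int.toStr ((m:Int)+100)) (3-1) = some (Nat.digitChar ((m+100)%10)) := by
    simp [PySem.Str.pyGet?, hL, PySem.List.pyGet?, PySem.List.pyIdx?]
  rw [g0, g1, g2]
  dsimp only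
  rw [ofChars_digitChar _ (by omega), ofChars_digitChar _ (by omega), ofChars_digitChar _ (by omega)]
  dsimp only
  have hcond : ((((m+100)/100 : Nat) : Int) - (((m+100)/10%10 : Nat) : Int) = (((m+100)/10%10 : Nat) : Int) - (((m+100)%10 : Nat) : Int))
      ↔ (apThreeDigit ((m:Int)+100) = true) := by
    unfold apThreeDigit
    rw [PySem.Int.floordiv_eq_ediv_of_pos (by norm_num), PySem.Int.floordiv_eq_ediv_of_pos (by norm_num),
        PySem.Int.mod_eq_emod_of_pos (by norm_num), PySem.Int.mod_eq_emod_of_pos (by norm_num)]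
    simp only [beq_iff_eq]
    push_cast
    constructor <;> intro hx <;> omega
  by_cases hc : apThreeDigit ((m:Int)+100) = true
  · rw [if_pos (hcond.mpr hc), if_pos hc]
    omega
  · rw [if_neg (fun hh => hc (hcond.mp hh)), if_neg hc]

lemma solveStep_small (i : Int) (h : i < 100) : solveStep 0 i = 1 := by
  unfold solveStep; simp [h]

lemma solveStep_big (i : Int) (h : 1000 ≤ i) : solveStep 0 i = 0 := by
  unfold solveStep
  rw [if_neg (by omega), if_neg (by omega)]

lemma solve_nat (n : Nat) : solve (n : Int) = solve_alt (n : Int) := by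
  induction n with
  | zero => decide
  | succ n ih =>
    have hA : solve ((n+1 : Nat) : Int)
        = solve (n : Int) + solveStep 0 ((n : Int) + 1) := by
      unfold solve
      have hr : PySem.List.pyRange 1 (((n+1 : Nat) : Int) + 1) 1
          = PySem.List.pyRange 1 ((n : Int) + 1) 1 ++ [((n:Int) + 1)] := by
        simp only [PySem.List.pyRange_one]
        have h1 : (((n+1 : Nat) : Int) + 1 - 1).toNat = ((n : Int) + 1 - 1).toNat + 1 := by omega
        rw [h1, List.range_succ]
        simp
        omega
      rw [hr, List.foldl_append]
      simp only [List.foldl_cons, List.foldl_nil]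
      exact solveStep_add _ _
    by_cases h99 : (n : Int) + 1 ≤ 99
    · have hB : solve_alt ((n+1 : Nat) : Int) = solve_alt (n : Int) + 1 := by
        unfold solve_alt
        have e1 : PySem.List.pyRange 100 (min ((n+1 : Nat) : Int) 999 + 1) 1 = [] := by
          simp only [PySem.List.pyRange_one]
          have : (min ((n+1 : Nat) : Int) 999 + 1 - 100).toNat = 0 := by omega
          rw [this]
          simp
        have e2 : PySem.List.pyRange 100 (min ((n : Nat) : Int) 999 + 1) 1 = [] := by
          simp only [PySem.List.pyRange_one]
          have : (min ((n : Nat) : Int) 999 + 1 - 100).toNat = 0 := by omega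
          rw [this]
          simp
        rw [e1, e2]
        simp only [List.foldl_nil]
        omega
      rw [hA, hB, ih, solveStep_small _ (by omega)]
    · by_cases h999 : (n : Int) + 1 ≤ 999
      · obtain ⟨m, hm, hmeq⟩ : ∃ m : Nat, m ≤ 899 ∧ (n : Int) + 1 = (m : Int) + 100 :=
          ⟨n - 99, by omega, by omega⟩
        have hB : solve_alt ((n+1 : Nat) : Int)
            = solve_alt (n : Int) + (if apThreeDigit ((n:Int)+1) then 1 else 0) := by
          unfold solve_alt
          have hrB : PySem.List.pyRange 100 (min ((n+1 : Nat) : Int) 999 + 1) 1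
              = PySem.List.pyRange 100 (min ((n : Nat) : Int) 999 + 1) 1 ++ [((n:Int) + 1)] := by
            simp only [PySem.List.pyRange_one]
            rw [min_eq_left (by omega : ((n+1 : Nat) : Int) ≤ 999), min_eq_left (by omega : ((n : Nat) : Int) ≤ 999)]
            have h1 : (((n+1 : Nat) : Int) + 1 - 100).toNat = (((n : Nat) : Int) + 1 - 100).toNat + 1 := by omega
            rw [h1, List.range_succ]
            simp
            omega
          have hmx : max 0 (min ((n+1 : Nat) : Int) 99) = max 0 (min ((n : Nat) : Int) 99) := by omega
          rw [hrB, hmx, List.foldl_append]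
          simp only [List.foldl_cons, List.foldl_nil]
          split <;> ring
        rw [hA, hB, ih, hmeq, step_eval m hm]
      · have hB : solve_alt ((n+1 : Nat) : Int) = solve_alt (n : Int) := by
          unfold solve_alt
          have e1 : min ((n+1 : Nat) : Int) 999 = min ((n : Nat) : Int) 999 := by omega
          have e2 : max 0 (min ((n+1 : Nat) : Int) 99) = max 0 (min ((n : Nat) : Int) 99) := by omega
          rw [e1, e2]
        rw [hA, hB, ih, solveStep_big _ (by omega)]
        ring

-- ===== VERDICT (by name: the statement is the Claim_ definition above) =====
theorem solve_spec : Claim_equal_solve := by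
  intro limit _
  unfold Spec_solve
  by_cases h : 0 ≤ limit
  · obtain ⟨n, rfl⟩ := Int.eq_ofNat_of_zero_le h
    exact solve_nat n
  · have eA : PySem.List.pyRange 1 (limit + 1) 1 = [] := by
      simp only [PySem.List.pyRange_one]
      have : (limit + 1 - 1).toNat = 0 := by omega
      rw [this]
      simp
    have eB : PySem.List.pyRange 100 (min limit 999 + 1) 1 = [] := by
      simp only [PySem.List.pyRange_one]
      have : (min limit 999 + 1 - 100).toNat = 0 := by omega
      rw [this]
      simp
    unfold solve solve_alt
    rw [eA, eB]
    simp only [List.foldl_nil]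
    omega
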